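-- pv_equiv track=rewrite | github.com/cirosantilli/project-euler-solvers | solvers/358.py | cyclic_digit_sum
-- ===== SOURCE A (Python) =====
-- def cyclic_digit_sum(prime):
--     result = 0
--     numerator = 1
--     cycle_length = 0
--     while True:
--         cycle_length += 1
--         numerator *= 10
--         result += numerator // prime
--         numerator %= prime
--         if numerator <= 1 or cycle_length == prime:
--             break
--
--     if cycle_length != prime - 1:
--         return 0
--
--     return result
-- ===== SOURCE B (Python) =====
-- def cyclic_digit_sum(prime):
--     # Full-reptend test by multiplicative order of 10 mod prime (O(sqrt(prime) * log(prime))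
--     # pow calls instead of O(prime) long division); if 10 is a primitive root mod prime the
--     # repeating block's digit sum is 9*(prime-1)//2.
--     if prime < 3 or prime % 2 == 0 or prime % 5 == 0:
--         return 0
--     n = prime - 1
--     if pow(10, n, prime) != 1:
--         return 0
--     d = 1
--     while d * d <= n:
--         if n % d == 0:
--             if d < n and pow(10, d, prime) == 1:
--                 return 0
--             e = n // d
--             if e < n and pow(10, e, prime) == 1:
--                 return 0
--         d += 1
--     return 9 * n // 2
-- ===== Notes on version B (the rewrite author's own statement) =====
-- stated objective: faster
-- what changed: Replaces the O(prime)-step long-division loop (summing each quotient digit) by a multiplicative-order test of 10 mod prime via modular exponentiation over the O(sqrt(prime)) divisors of prime-1, returning the closed form 9*(prime-1)//2 for full-reptend primes.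
-- intended difference: For prime=2 A returns 5 (the digit of the terminating expansion 0.5, accepted because cycle_length==1==prime-1 by accident even though the remainder hit 0), while B returns 0; 1/2 has no repeating block so 0 is the intended value. — e.g. on cyclic_digit_sum(2): A returns 5, B returns 0
import Mathlib
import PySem

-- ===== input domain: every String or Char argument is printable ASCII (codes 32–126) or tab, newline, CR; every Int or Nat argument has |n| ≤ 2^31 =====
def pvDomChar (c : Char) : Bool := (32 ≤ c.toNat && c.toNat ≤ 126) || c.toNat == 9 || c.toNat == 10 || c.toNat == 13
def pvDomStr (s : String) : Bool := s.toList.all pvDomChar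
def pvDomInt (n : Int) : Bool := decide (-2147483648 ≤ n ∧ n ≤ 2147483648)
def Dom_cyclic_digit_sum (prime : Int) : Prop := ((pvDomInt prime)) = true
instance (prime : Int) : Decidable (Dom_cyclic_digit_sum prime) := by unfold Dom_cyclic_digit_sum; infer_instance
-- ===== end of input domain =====

-- B replaces A's O(prime)-step long-division loop by a multiplicative-order test of 10 mod prime
-- (modular exponentiation over the divisors of prime-1) and the closed form 9*(prime-1)//2 (objective: faster).

-- ===== PORT A =====
-- the while-True loop; fuel prime.toNat+1 bounds the iteration count (the loop breaks at
-- cycle_length == prime at the latest, and after its first step for prime < 0)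
def pvLoopA (prime : Int) : Nat → Int → Int → Int → Int × Int
  | 0, result, _, cycle_length => (result, cycle_length)
  | fuel+1, result, numerator, cycle_length =>
    let cycle_length' := cycle_length + 1
    let numerator' := numerator * 10
    let result' := result + PySem.Int.floordiv numerator' prime
    let numerator'' := PySem.Int.mod numerator' prime
    if numerator'' ≤ 1 ∨ cycle_length' = prime then (result', cycle_length')
    else pvLoopA prime fuel result' numerator'' cycle_length'

def cyclic_digit_sum (prime : Int) : Int :=
  let r := pvLoopA prime (prime.toNat + 1) 0 1 0
  if r.2 ≠ prime - 1 then 0 else r.1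

-- ===== PORT B =====
-- divisor scan d = 1, 2, … while d*d <= n; fuel n.toNat+2 bounds the iteration count;
-- pow(10, e, prime) is PySem.Int.powMod 10 e prime (exponents here are always ≥ 0)
def pvAltLoop (prime n : Int) : Nat → Int → Int
  | 0, _ => PySem.Int.floordiv (9 * n) 2   -- unreachable for the fuel passed below
  | fuel+1, d =>
    if d * d ≤ n then
      if PySem.Int.mod n d = 0 then
        if d < n ∧ PySem.Int.powMod 10 d.toNat prime = 1 then 0
        else
          let e := PySem.Int.floordiv n d
          if e < n ∧ PySem.Int.powMod 10 e.toNat prime = 1 then 0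
          else pvAltLoop prime n fuel (d + 1)
      else pvAltLoop prime n fuel (d + 1)
    else PySem.Int.floordiv (9 * n) 2

def cyclic_digit_sum_alt (prime : Int) : Int :=
  if prime < 3 ∨ PySem.Int.mod prime 2 = 0 ∨ PySem.Int.mod prime 5 = 0 then 0
  else
    let n := prime - 1
    if PySem.Int.powMod 10 n.toNat prime ≠ 1 then 0
    else pvAltLoop prime n (n.toNat + 2) 1

-- ===== PRECONDITION & SPEC =====
-- Pre_ excludes exactly prime = 0, on which A raises ZeroDivisionError
def Pre_cyclic_digit_sum (prime : Int) : Prop := prime ≠ 0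
instance (prime : Int) : Decidable (Pre_cyclic_digit_sum prime) := by unfold Pre_cyclic_digit_sum; infer_instance
def pvWitness_cyclic_digit_sum : Int := 7

-- For prime=2 A returns 5 (the digit of the terminating expansion 0.5, accepted because
-- cycle_length==1==prime-1 by accident even though the remainder hit 0), while B returns 0;
-- 1/2 has no repeating block so 0 is the intended value.
def D_cyclic_digit_sum (prime : Int) : Prop := prime = 2
instance (prime : Int) : Decidable (D_cyclic_digit_sum prime) := by unfold D_cyclic_digit_sum; infer_instance
def Spec_cyclic_digit_sum (prime : Int) (out : Int) : Prop := ¬ D_cyclic_digit_sum prime → out = cyclic_digit_sum_alt prime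
instance (prime : Int) (out : Int) : Decidable (Spec_cyclic_digit_sum prime out) := by unfold Spec_cyclic_digit_sum; infer_instance
def pvDiffWitness_cyclic_digit_sum : Int := 2
def pvDiffWitnessOut_cyclic_digit_sum : Int × Int := (5, 0)

-- ===== CLAIM (what is proved, stated in full; the proofs are below) =====
def Claim_unchanged_cyclic_digit_sum : Prop := ∀ (prime : Int), Dom_cyclic_digit_sum prime → Pre_cyclic_digit_sum prime → Spec_cyclic_digit_sum prime (cyclic_digit_sum prime)
def Claim_changed_cyclic_digit_sum : Prop := Dom_cyclic_digit_sum (pvDiffWitness_cyclic_digit_sum) ∧ Pre_cyclic_digit_sum (pvDiffWitness_cyclic_digit_sum) ∧ D_cyclic_digit_sum (pvDiffWitness_cyclic_digit_sum) ∧ cyclic_digit_sum (pvDiffWitness_cyclic_digit_sum) = pvDiffWitnessOut_cyclic_digit_sum.1 ∧ cyclic_digit_sum_alt (pvDiffWitness_cyclic_digit_sum) = pvDiffWitnessOut_cyclic_digit_sum.2 ∧ pvDiffWitnessOut_cyclic_digit_sum.1 ≠ pvDiffWitnessOut_cyclic_digit_sum.2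
def Claim_exact_cyclic_digit_sum : Prop := ∀ (prime : Int), Dom_cyclic_digit_sum prime → Pre_cyclic_digit_sum prime → D_cyclic_digit_sum prime → cyclic_digit_sum prime ≠ cyclic_digit_sum_alt prime

-- ===== LEMMAS AND PROOFS =====

-- the remainder sequence of the long division: pvR P j = 10^j mod P
def pvR (P j : ℕ) : ℕ := 10 ^ j % P
-- partial sums of the remainders / of the quotient digits
def pvT (p : Int) (k : ℕ) : Int := ∑ j ∈ Finset.range k, (pvR p.toNat j : Int)
def pvDsum (p : Int) (k : ℕ) : Int := ∑ j ∈ Finset.range k, PySem.Int.floordiv ((pvR p.toNat j : Int) * 10) p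

lemma pvMod_cast (p : Int) (hp : 0 < p) (a : ℕ) :
    PySem.Int.mod (a : Int) p = ((a % p.toNat : ℕ) : Int) := by
  rw [PySem.Int.mod_eq_emod_of_pos hp]
  conv_lhs => rw [← Int.toNat_of_nonneg hp.le]
  exact_mod_cast rfl

lemma pvR_succ (p : Int) (hp : 0 < p) (k : ℕ) :
    PySem.Int.mod ((pvR p.toNat k : Int) * 10) p = (pvR p.toNat (k+1) : Int) := by
  have h : ((pvR p.toNat k : Int) * 10) = ((pvR p.toNat k * 10 : ℕ) : Int) := by push_cast; ring
  rw [h, pvMod_cast p hp]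
  congr 1
  simp only [pvR]
  conv_rhs => rw [pow_succ, Nat.mul_mod]
  rw [Nat.mul_mod, Nat.mod_mod_of_dvd _ dvd_rfl]

lemma pvDig_step (p : Int) (hp : 0 < p) (k : ℕ) :
    PySem.Int.floordiv ((pvR p.toNat k : Int) * 10) p * p
      = (pvR p.toNat k : Int) * 10 - (pvR p.toNat (k+1) : Int) := by
  have := PySem.Int.floordiv_mul_add_mod ((pvR p.toNat k : Int) * 10) p
  rw [pvR_succ p hp k] at this
  omega

-- A's loop, characterized by the first stopping index N
lemma pvLoopA_run (p : Int) (hp : 2 ≤ p) (N : ℕ)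
    (hstop : 1 ≤ N ∧ (pvR p.toNat N ≤ 1 ∨ N = p.toNat))
    (hmin : ∀ j, j < N → ¬ (1 ≤ j ∧ (pvR p.toNat j ≤ 1 ∨ j = p.toNat))) :
    ∀ fuel k, k < N → N ≤ k + fuel →
      pvLoopA p fuel (pvDsum p k) ((pvR p.toNat k : ℕ) : Int) (k : Int)
        = (pvDsum p N, (N : Int)) := by
  intro fuel
  induction fuel with
  | zero => intro k h1 h2; omega
  | succ f ih =>
    intro k h1 h2
    have hds : pvDsum p k + PySem.Int.floordiv ((pvR p.toNat k : Int) * 10) p = pvDsum p (k+1) := by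
      rw [pvDsum, pvDsum, Finset.sum_range_succ]
    have hcond : (PySem.Int.mod ((pvR p.toNat k : Int) * 10) p ≤ 1 ∨ ((k : Int) + 1 = p))
        ↔ (pvR p.toNat (k+1) ≤ 1 ∨ k + 1 = p.toNat) := by
      rw [pvR_succ p (by omega) k]
      constructor
      · rintro (h | h)
        · exact Or.inl (by exact_mod_cast h)
        · exact Or.inr (by omega)
      · rintro (h | h)
        · exact Or.inl (by exact_mod_cast h)
        · exact Or.inr (by omega)
    by_cases hkN : k + 1 = N
    · have hc : pvR p.toNat (k+1) ≤ 1 ∨ k + 1 = p.toNat := hkN ▸ hstop.2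
      simp only [pvLoopA]
      rw [if_pos (hcond.mpr hc)]
      rw [hds, ← hkN]
      push_cast
      rfl
    · have hlt : k + 1 < N := by omega
      have hc : ¬ (pvR p.toNat (k+1) ≤ 1 ∨ k + 1 = p.toNat) := by
        intro h; exact hmin (k+1) hlt ⟨by omega, h⟩
      simp only [pvLoopA]
      rw [if_neg (fun h => hc (hcond.mp h))]
      rw [hds, pvR_succ p (by omega) k]
      have := ih (k+1) hlt (by omega)
      push_cast at this ⊢
      exact this

-- A on p ≥ 2, in terms of the first stopping index N
lemma pvA_char (p : Int) (hp : 2 ≤ p) (N : ℕ)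
    (hstop : 1 ≤ N ∧ (pvR p.toNat N ≤ 1 ∨ N = p.toNat))
    (hmin : ∀ j, j < N → ¬ (1 ≤ j ∧ (pvR p.toNat j ≤ 1 ∨ j = p.toNat))) :
    cyclic_digit_sum p = if (N : Int) ≠ p - 1 then 0 else pvDsum p N := by
  have hNle : N ≤ p.toNat := by
    by_contra h
    exact hmin p.toNat (by omega) ⟨by omega, Or.inr rfl⟩
  have h0 : pvDsum p 0 = 0 := by simp [pvDsum]
  have hr0 : pvR p.toNat 0 = 1 := by
    have : 1 < p.toNat := by omega
    simp [pvR, Nat.mod_eq_of_lt this]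
  have := pvLoopA_run p hp N hstop hmin (p.toNat + 1) 0 (by omega) (by omega)
  rw [h0, hr0] at this
  unfold cyclic_digit_sum
  rw [show ((0:ℕ):Int) = (0:Int) from rfl] at this
  rw [show ((1:ℕ):Int) = (1:Int) from rfl] at this
  rw [this]

-- A on negative p returns 0 (the first remainder already has the divisor's sign)
lemma pvA_neg (p : Int) (hp : p < 0) : cyclic_digit_sum p = 0 := by
  have h1 : p.toNat = 0 := by omega
  have hm := (PySem.Int.mod_neg_bounds (a := 1 * 10) hp).2
  unfold cyclic_digit_sum
  rw [h1]
  simp only [pvLoopA]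
  rw [if_pos (Or.inl (by omega))]
  simp only
  rw [if_pos (by omega)]

lemma pvR_lt (P : ℕ) (hP : 0 < P) (j : ℕ) : pvR P j < P := Nat.mod_lt _ hP

lemma pvR_cast (P j : ℕ) : ((pvR P j : ℕ) : ZMod P) = (10 : ZMod P)^j := by
  unfold pvR
  push_cast [ZMod.natCast_mod]
  ring

lemma pvR_eq_one_iff (P : ℕ) (hP : 2 ≤ P) (j : ℕ) : pvR P j = 1 ↔ (10:ZMod P)^j = 1 := by
  constructor
  · intro h; rw [← pvR_cast, h]; simp
  · intro h
    have h1 : ((pvR P j : ℕ) : ZMod P) = ((1 : ℕ) : ZMod P) := by rw [pvR_cast, h]; simp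
    have := ZMod.val_cast_of_lt (pvR_lt P (by omega) j)
    have h2 := ZMod.val_cast_of_lt (a := 1) (n := P) (by omega)
    rw [h1] at this; omega

lemma pvR_ne_zero (P : ℕ) (hP : 2 ≤ P) (cop : Nat.Coprime P 10) (j : ℕ) : pvR P j ≠ 0 := by
  intro h
  have hdvd : P ∣ 10 ^ j := (Nat.dvd_iff_mod_eq_zero ..).mpr h
  have := Nat.Coprime.eq_one_of_dvd (cop.pow_right j) hdvd
  omega

lemma pvOrd_dvd (P N : ℕ) (hN : 1 ≤ N) (hx1 : (10:ZMod P)^N = 1)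
    (hminR : ∀ j, 1 ≤ j → j < N → (10:ZMod P)^j ≠ 1) :
    ∀ m, (10:ZMod P)^m = 1 → N ∣ m := by
  intro m hm
  have hdecomp : m = N * (m / N) + m % N := (Nat.div_add_mod m N).symm
  have h1 : (10:ZMod P)^(m % N) = 1 := by
    have h2 : (10:ZMod P)^m = ((10:ZMod P)^N)^(m / N) * (10:ZMod P)^(m % N) := by
      rw [← pow_mul, ← pow_add, ← hdecomp]
    rw [hx1, one_pow, one_mul] at h2
    rw [← h2, hm]
  rcases Nat.eq_zero_or_pos (m % N) with h | h
  · exact Nat.dvd_of_mod_eq_zero h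
  · exact absurd h1 (hminR _ h (Nat.mod_lt _ (by omega)))

lemma pvPow_inj (P N : ℕ) (hu : IsUnit (10:ZMod P))
    (hminR : ∀ j, 1 ≤ j → j < N → (10:ZMod P)^j ≠ 1) :
    ∀ i j, i < N → j < N → (10:ZMod P)^i = (10:ZMod P)^j → i = j := by
  have key : ∀ i j, i < j → j < N → (10:ZMod P)^i = (10:ZMod P)^j → False := by
    intro i j hij hjN h
    have h0 : (10:ZMod P)^i * (10:ZMod P)^(j-i) = (10:ZMod P)^i * 1 := by
      rw [← pow_add, mul_one, show i + (j - i) = j by omega, h]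
    have h1 : (10:ZMod P)^(j-i) = 1 := (hu.pow i).mul_left_cancel h0
    exact hminR (j-i) (by omega) (by omega) h1
  intro i j hi hj h
  rcases lt_trichotomy i j with h' | h' | h'
  · exact absurd (key i j h' hj h) not_false
  · exact h'
  · exact absurd (key j i h' hi h.symm) not_false

-- over a full reptend period the remainders are a permutation of 1..P-1 (Gauss sum)
lemma pvSum_full (P N : ℕ) (hP : 2 ≤ P) (cop : Nat.Coprime P 10)
    (hu : IsUnit (10:ZMod P))
    (hminR : ∀ j, 1 ≤ j → j < N → (10:ZMod P)^j ≠ 1)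
    (hNP : N = P - 1) :
    2 * ∑ j ∈ Finset.range N, pvR P j = P * (P - 1) := by
  have hinj : Set.InjOn (pvR P) (Finset.range N) := by
    intro i hi j hj h
    simp only [Finset.coe_range, Set.mem_Iio] at hi hj
    apply pvPow_inj P N hu hminR i j hi hj
    rw [← pvR_cast, ← pvR_cast, h]
  have hsub : Finset.image (pvR P) (Finset.range N) ⊆ Finset.Icc 1 (P-1) := by
    intro x hx
    simp only [Finset.mem_image] at hx
    obtain ⟨j, _, rfl⟩ := hx
    have h1 := pvR_lt P (by omega) j
    have h2 := pvR_ne_zero P hP cop j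
    simp only [Finset.mem_Icc]; omega
  have hcard : (Finset.Icc 1 (P-1)).card ≤ (Finset.image (pvR P) (Finset.range N)).card := by
    rw [Finset.card_image_of_injOn hinj, Finset.card_range, Nat.card_Icc]
    omega
  have heq : Finset.image (pvR P) (Finset.range N) = Finset.Icc 1 (P-1) :=
    Finset.eq_of_subset_of_card_le hsub hcard
  have hsum : ∑ j ∈ Finset.range N, pvR P j = ∑ x ∈ Finset.Icc 1 (P-1), x := by
    rw [← heq, Finset.sum_image (fun a ha b hb => hinj ha hb)]
  rw [hsum]
  obtain ⟨Q, rfl⟩ : ∃ Q, P = Q + 2 := ⟨P - 2, by omega⟩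
  have hIcc : Finset.Icc 1 (Q + 2 - 1) = Finset.Ico 1 (Q+2) := by
    ext x; simp [Finset.mem_Icc, Finset.mem_Ico]; omega
  rw [hIcc, Finset.sum_Ico_eq_sum_range]
  have hsplit : ∑ k ∈ Finset.range (Q + 2 - 1), (1 + k) = (Q + 1) + ∑ k ∈ Finset.range (Q + 1), k := by
    rw [show Q + 2 - 1 = Q + 1 from rfl, Finset.sum_add_distrib]
    simp
  rw [hsplit]
  have h2 := Finset.sum_range_id_mul_two (Q + 1)
  rw [show Q + 1 - 1 = Q from rfl] at h2
  rw [show (Q+2) * (Q + 2 - 1) = (Q+2)*(Q+1) from rfl]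
  nlinarith [h2]

lemma pvTwoPow (m : ℕ) (h : 2 ≤ m) : m + 2 ≤ 2 ^ m := by
  induction m with
  | zero => omega
  | succ k ih =>
    rcases Nat.lt_or_ge k 2 with hk | hk
    · interval_cases k
      · omega
      · norm_num
    · have h1 := ih hk
      have h3 : 2 ^ (k+1) = 2 * 2 ^ k := by ring
      omega

-- if P divides a power of 10, it divides 10^m for some small m ≤ P-2
lemma pvMaxPow (P : ℕ) (hP : 3 ≤ P) (j : ℕ) (h : P ∣ 10 ^ j) :
    ∃ m, 1 ≤ m ∧ m ≤ P - 2 ∧ P ∣ 10 ^ m := by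
  have h10 : (10:ℕ) ^ j = 2 ^ j * 5 ^ j := by rw [← mul_pow]; norm_num
  rw [h10] at h
  obtain ⟨u, v, hu, hv, huv⟩ := Nat.dvd_mul.mp h
  obtain ⟨i, hij, rfl⟩ := (Nat.dvd_prime_pow Nat.prime_two).mp hu
  obtain ⟨l, hlj, rfl⟩ := (Nat.dvd_prime_pow (by norm_num)).mp hv
  refine ⟨max i l, ?_, ?_, ?_⟩
  · rcases Nat.eq_zero_or_pos (max i l) with h0 | h0
    · exfalso
      have hi : i = 0 ∧ l = 0 := by omega
      rw [hi.1, hi.2] at huv; simp at huv; omega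
    · omega
  · have h2i : 2 ^ i ≤ P := Nat.le_of_dvd (by omega) (huv ▸ dvd_mul_right _ _)
    have h5l : 5 ^ l ≤ P := Nat.le_of_dvd (by omega) (huv ▸ dvd_mul_left _ _)
    have h2m : 2 ^ max i l ≤ P := by
      rcases Nat.le_total i l with hil | hil
      · calc 2 ^ max i l = 2 ^ l := by rw [Nat.max_eq_right hil]
          _ ≤ 5 ^ l := Nat.pow_le_pow_left (by norm_num) l
          _ ≤ P := h5l
      · calc 2 ^ max i l = 2 ^ i := by rw [Nat.max_eq_left hil]
          _ ≤ P := h2i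
    rcases Nat.lt_or_ge (max i l) 2 with hm | hm
    · omega
    · have := pvTwoPow (max i l) hm; omega
  · have hd : 2 ^ i * 5 ^ l ∣ 2 ^ max i l * 5 ^ max i l :=
      mul_dvd_mul (pow_dvd_pow 2 (Nat.le_max_left i l)) (pow_dvd_pow 5 (Nat.le_max_right i l))
    rw [← mul_pow] at hd
    norm_num at hd
    exact huv ▸ hd

-- when gcd(P,10) > 1 the loop cannot stop exactly at index P-1
lemma pvNoncop (P N : ℕ) (hP : 3 ≤ P) (hq : 2 ∣ P ∨ 5 ∣ P)
    (hstop : 1 ≤ N ∧ (pvR P N ≤ 1 ∨ N = P))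
    (hmin : ∀ j, j < N → ¬ (1 ≤ j ∧ (pvR P j ≤ 1 ∨ j = P))) :
    N ≠ P - 1 := by
  obtain ⟨hN1, hNd⟩ := hstop
  rcases hNd with hR | hNP
  · have hcase : pvR P N = 0 ∨ pvR P N = 1 := by omega
    rcases hcase with h0 | h1
    · have hdvd : P ∣ 10 ^ N := (Nat.dvd_iff_mod_eq_zero ..).mpr h0
      obtain ⟨m, hm1, hm2, hmd⟩ := pvMaxPow P hP N hdvd
      have hRm : pvR P m = 0 := (Nat.dvd_iff_mod_eq_zero ..).mp hmd
      have hNm : N ≤ m := by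
        by_contra hc
        exact hmin m (by omega) ⟨hm1, Or.inl (by omega)⟩
      omega
    · exfalso
      have hmod : 10 ^ N % P = 1 := h1
      have hPd : P ∣ 10 ^ N - 1 := by
        have := Nat.div_add_mod (10 ^ N) P
        exact ⟨10 ^ N / P, by omega⟩
      obtain ⟨q, hq10, hqP⟩ : ∃ q, q ∣ 10 ∧ q ∣ P ∧ 2 ≤ q := by
        rcases hq with h | h
        · exact ⟨2, by norm_num, h, by norm_num⟩
        · exact ⟨5, by norm_num, h, by norm_num⟩
      have hq1 : q ∣ 10 ^ N := dvd_pow hq10 (by omega)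
      have hq2 : q ∣ 10 ^ N - 1 := hqP.1.trans hPd
      have hqone : q ∣ 1 := by
        have h3 : 10 ^ N - (10 ^ N - 1) = 1 := by
          have : 1 ≤ 10 ^ N := Nat.one_le_pow _ _ (by norm_num)
          omega
        exact h3 ▸ Nat.dvd_sub hq1 hq2
      have := Nat.le_of_dvd (by norm_num) hqone
      omega
  · omega

lemma pvTel (p : Int) (hp : 0 < p) (k : ℕ) :
    pvDsum p k * p = 9 * pvT p k + (pvR p.toNat 0 : Int) - (pvR p.toNat k : Int) := by
  induction k with
  | zero => simp [pvDsum, pvT]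
  | succ k ih =>
    rw [pvDsum, Finset.sum_range_succ, ← pvDsum, add_mul, ih, pvDig_step p hp k,
        show pvT p (k+1) = pvT p k + (pvR p.toNat k : Int) by rw [pvT, Finset.sum_range_succ, ← pvT]]
    ring

lemma pvPowMod_char (p : Int) (hp : 2 ≤ p) (e : ℕ) :
    PySem.Int.powMod 10 e p = (pvR p.toNat e : Int) := by
  rw [PySem.Int.powMod_eq]
  have h : ((10:Int) ^ e) = ((10 ^ e : ℕ) : Int) := by push_cast; ring
  rw [h]
  rw [PySem.Int.mod_eq_emod_of_pos (by omega)]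
  conv_lhs => rw [← Int.toNat_of_nonneg (by omega : (0:Int) ≤ p)]
  exact_mod_cast rfl

-- value of the digit sum over a full reptend period
lemma pvDsum_val (p : Int) (hp : 3 ≤ p) (N : ℕ)
    (hsum2 : 2 * ∑ j ∈ Finset.range N, pvR p.toNat j = p.toNat * (p.toNat - 1))
    (hr0 : pvR p.toNat 0 = 1) (hrN : pvR p.toNat N = 1) :
    pvDsum p N = PySem.Int.floordiv (9 * (p - 1)) 2 := by
  have hP : ((p.toNat : ℤ)) = p := Int.toNat_of_nonneg (by omega)
  have hs : ((∑ j ∈ Finset.range N, pvR p.toNat j : ℕ) : ℤ) = pvT p N := by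
    rw [pvT]; push_cast; rfl
  have hT : 2 * pvT p N = p * (p - 1) := by
    have hc := congrArg (fun x : ℕ => (x : ℤ)) hsum2
    simp only [Nat.cast_mul, Nat.cast_ofNat] at hc
    rw [hs] at hc
    rw [hc]
    have h1 : ((p.toNat - 1 : ℕ) : ℤ) = p - 1 := by omega
    rw [h1, hP]
  have htel : pvDsum p N * p = 9 * pvT p N := by
    rw [pvTel p (by omega) N, hr0, hrN]
    ring
  have h2d : 2 * pvDsum p N = 9 * (p - 1) := by
    have hcalc : (2 * pvDsum p N) * p = (9 * (p - 1)) * p := by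
      calc (2 * pvDsum p N) * p = 2 * (pvDsum p N * p) := by ring
        _ = 2 * (9 * pvT p N) := by rw [htel]
        _ = 9 * (2 * pvT p N) := by ring
        _ = 9 * (p * (p-1)) := by rw [hT]
        _ = (9 * (p - 1)) * p := by ring
    exact mul_right_cancel₀ (by omega) hcalc
  rw [PySem.Int.floordiv_eq_ediv_of_pos (by omega : (0:Int) < 2), ← h2d, mul_comm]
  exact (Int.mul_ediv_cancel _ (by omega)).symm

lemma pvAltLoop_done (p n : Int) (hn : 1 ≤ n)
    (hdiv : ∀ d : Int, 1 ≤ d → d < n → d ∣ n → PySem.Int.powMod 10 d.toNat p ≠ 1) :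
    ∀ fuel (d : Int), 1 ≤ d → pvAltLoop p n fuel d = PySem.Int.floordiv (9 * n) 2 := by
  intro fuel
  induction fuel with
  | zero => intro d _; rfl
  | succ f ih =>
    intro d hd
    simp only [pvAltLoop]
    by_cases hdd : d * d ≤ n
    · rw [if_pos hdd]
      by_cases hmod : PySem.Int.mod n d = 0
      · rw [if_pos hmod]
        have hdvd : d ∣ n := (PySem.Int.mod_eq_zero_iff_dvd n d).mp hmod
        have hc1 : ¬ (d < n ∧ PySem.Int.powMod 10 d.toNat p = 1) := by
          rintro ⟨h1, h2⟩; exact hdiv d hd h1 hdvd h2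
        rw [if_neg hc1]
        have he : PySem.Int.floordiv n d = n / d := PySem.Int.floordiv_eq_ediv_of_pos (by omega)
        have hedvd : n / d ∣ n := Int.ediv_dvd_of_dvd hdvd
        have he1 : 1 ≤ n / d :=
          Int.le_ediv_iff_mul_le (by omega) |>.mpr (by simpa using Int.le_of_dvd (by omega) hdvd)
        have hc2 : ¬ (PySem.Int.floordiv n d < n ∧ PySem.Int.powMod 10 (PySem.Int.floordiv n d).toNat p = 1) := by
          rintro ⟨h1, h2⟩
          rw [he] at h1 h2
          exact hdiv (n / d) he1 h1 hedvd h2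
        rw [if_neg hc2]
        exact ih (d+1) (by omega)
      · rw [if_neg hmod]
        exact ih (d+1) (by omega)
    · rw [if_neg hdd]

lemma pvAltLoop_zero (p n : Int) (_hn : 1 ≤ n) (D : Int)
    (hD1 : 1 ≤ D) (hDn : D < n) (hdvd : D ∣ n)
    (hpow : PySem.Int.powMod 10 D.toNat p = 1) :
    ∀ fuel (d : Int), 1 ≤ d → d ≤ min D (n / D) → (min D (n / D)).toNat < d.toNat + fuel →
      pvAltLoop p n fuel d = 0 := by
  set D2 := n / D with hD2def
  have hDD2 : D * D2 = n := Int.mul_ediv_cancel' hdvd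
  have hD2pos : 1 ≤ D2 := by nlinarith
  have hD2dvd : D2 ∣ n := Int.ediv_dvd_of_dvd hdvd
  intro fuel
  induction fuel with
  | zero => intro d hd1 hdE hfuel; omega
  | succ f ih =>
    intro d hd1 hdE hfuel
    have hED : min D D2 ≤ D := min_le_left _ _
    have hED2 : min D D2 ≤ D2 := min_le_right _ _
    have hdd : d * d ≤ n := by nlinarith
    simp only [pvAltLoop]
    rw [if_pos hdd]
    by_cases hdeq : d = min D D2
    · have hmod : PySem.Int.mod n d = 0 := by
        rw [PySem.Int.mod_eq_zero_iff_dvd]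
        rcases le_total D D2 with h | h
        · rw [hdeq, min_eq_left h]; exact hdvd
        · rw [hdeq, min_eq_right h]; exact hD2dvd
      rw [if_pos hmod]
      rcases le_total D D2 with h | h
      · have hdD : d = D := by rw [hdeq, min_eq_left h]
        rw [if_pos (by rw [hdD]; exact ⟨hDn, hpow⟩)]
      · have hdD2 : d = D2 := by rw [hdeq, min_eq_right h]
        by_cases hc1 : d < n ∧ PySem.Int.powMod 10 d.toNat p = 1
        · rw [if_pos hc1]
        · rw [if_neg hc1]
          have hnd : PySem.Int.floordiv n d = D := by
            rw [PySem.Int.floordiv_eq_ediv_of_pos (by omega), hdD2]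
            rw [show n = D2 * D by linarith [hDD2]]
            exact Int.mul_ediv_cancel_left D (by omega)
          rw [if_pos (by rw [hnd]; exact ⟨hDn, hpow⟩)]
    · have hdlt : d < min D D2 := lt_of_le_of_ne hdE hdeq
      by_cases hmod : PySem.Int.mod n d = 0
      · rw [if_pos hmod]
        by_cases hc1 : d < n ∧ PySem.Int.powMod 10 d.toNat p = 1
        · rw [if_pos hc1]
        · rw [if_neg hc1]
          by_cases hc2 : PySem.Int.floordiv n d < n ∧ PySem.Int.powMod 10 (PySem.Int.floordiv n d).toNat p = 1
          · rw [if_pos hc2]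
          · rw [if_neg hc2]
            exact ih (d+1) (by omega) (by omega) (by omega)
      · rw [if_neg hmod]
        exact ih (d+1) (by omega) (by omega) (by omega)

-- ===== VERDICT =====
theorem cyclic_digit_sum_spec : Claim_unchanged_cyclic_digit_sum := by
  intro prime hdom hpre hnd
  have hpre' : prime ≠ 0 := hpre
  have hnd' : prime ≠ 2 := hnd
  rcases lt_trichotomy prime 0 with hneg | hz | hpos
  · -- negative: both 0
    rw [pvA_neg prime hneg]
    unfold cyclic_digit_sum_alt
    rw [if_pos (Or.inl (by omega))]
  · exact absurd hz hpre'
  · rcases Nat.lt_or_ge prime.toNat 3 with hsmall | hbig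
    · -- prime = 1 (positive, ≠ 0, ≠ 2, < 3)
      have h1 : prime = 1 := by omega
      subst h1; decide
    · -- prime ≥ 3
      have hp3 : 3 ≤ prime := by omega
      set P := prime.toNat with hPdef
      have hP : ((P : ℤ)) = prime := Int.toNat_of_nonneg (by omega)
      have hex : ∃ j, 1 ≤ j ∧ (pvR P j ≤ 1 ∨ j = P) := ⟨P, by omega, Or.inr rfl⟩
      set N := Nat.find hex with hNdef
      have hstop : 1 ≤ N ∧ (pvR P N ≤ 1 ∨ N = P) := Nat.find_spec hex
      have hmin : ∀ j, j < N → ¬ (1 ≤ j ∧ (pvR P j ≤ 1 ∨ j = P)) := fun j hj => Nat.find_min hex hj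
      have hA := pvA_char prime (by omega) N hstop hmin
      have hr0 : pvR P 0 = 1 := by
        have : 1 < P := by omega
        simp [pvR, Nat.mod_eq_of_lt this]
      -- B's leading guard
      have hg2 : PySem.Int.mod prime 2 = 0 ↔ (2:ℕ) ∣ P := by
        rw [PySem.Int.mod_eq_zero_iff_dvd, ← hP]
        exact_mod_cast Iff.rfl
      have hg5 : PySem.Int.mod prime 5 = 0 ↔ (5:ℕ) ∣ P := by
        rw [PySem.Int.mod_eq_zero_iff_dvd, ← hP]
        exact_mod_cast Iff.rfl
      by_cases hnc : (2:ℕ) ∣ P ∨ (5:ℕ) ∣ P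
      · -- shares a factor with 10: both return 0
        have hB : cyclic_digit_sum_alt prime = 0 := by
          unfold cyclic_digit_sum_alt
          rw [if_pos (by rcases hnc with h | h
                         · exact Or.inr (Or.inl (hg2.mpr h))
                         · exact Or.inr (Or.inr (hg5.mpr h)))]
        have hNne := pvNoncop P N (by omega) hnc hstop hmin
        rw [hA, hB, if_pos (by omega)]
      · push_neg at hnc
        have cop : Nat.Coprime P 10 := by
          rw [show (10:ℕ) = 2 * 5 by norm_num, Nat.coprime_mul_iff_right]
          exact ⟨((Nat.Prime.coprime_iff_not_dvd Nat.prime_two).mpr hnc.1).symm,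
                 ((Nat.Prime.coprime_iff_not_dvd (by norm_num)).mpr hnc.2).symm⟩
        have hu : IsUnit (10 : ZMod P) := by
          have := (ZMod.isUnit_iff_coprime 10 P).mpr cop.symm
          simpa using this
        -- Euler gives a stopping index < P, so N < P and pvR P N = 1
        have heuler : pvR P P.totient = 1 := by
          have := Nat.ModEq.pow_totient (cop.symm)
          unfold Nat.ModEq at this
          rw [Nat.one_mod_eq_one.mpr (by omega)] at this
          exact this
        have hphi1 : 1 ≤ P.totient := Nat.totient_pos.mpr (by omega)
        have hphiP : P.totient < P := Nat.totient_lt P (by omega)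
        have hNphi : N ≤ P.totient := Nat.find_le ⟨hphi1, Or.inl (by omega)⟩
        have hNP : N < P := by omega
        have hRN : pvR P N = 1 := by
          rcases hstop.2 with h | h
          · have := pvR_ne_zero P (by omega) cop N; omega
          · omega
        have hminR : ∀ j, 1 ≤ j → j < N → (10:ZMod P)^j ≠ 1 := by
          intro j hj1 hjN hx
          have h1 : pvR P j = 1 := (pvR_eq_one_iff P (by omega) j).mpr hx
          exact hmin j hjN ⟨hj1, Or.inl (by omega)⟩
        have hx1 : (10:ZMod P)^N = 1 := (pvR_eq_one_iff P (by omega) N).mp hRN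
        -- B's guard is false; inner pow test is pvR P (P-1)
        have hn1 : ((prime - 1).toNat) = P - 1 := by omega
        have hpowtop : PySem.Int.powMod 10 (prime - 1).toNat prime = (pvR P (P-1) : Int) := by
          rw [hn1]; exact pvPowMod_char prime (by omega) (P-1)
        by_cases hNeq : N = P - 1
        · -- full reptend: A returns the digit sum, B passes all tests
          have hRtop : pvR P (P-1) = 1 := hNeq ▸ hRN
          have hAval : cyclic_digit_sum prime = pvDsum prime N := by
            rw [hA, if_neg (by omega)]
          have hsum2 := pvSum_full P N (by omega) cop hu hminR hNeq
          have hBval : cyclic_digit_sum_alt prime = PySem.Int.floordiv (9 * (prime - 1)) 2 := by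
            unfold cyclic_digit_sum_alt
            rw [if_neg (by push_neg; exact ⟨by omega, fun h => hnc.1 (hg2.mp h), fun h => hnc.2 (hg5.mp h)⟩)]
            simp only
            rw [if_neg (by rw [hpowtop, hRtop]; exact fun h => h rfl)]
            rw [pvAltLoop_done prime (prime - 1) (by omega) ?hdiv ((prime-1).toNat + 2) 1 (by omega)]
            case hdiv =>
              intro d hd1 hdn hddvd hpow
              have hdN : d.toNat < N := by omega
              have hdN1 : 1 ≤ d.toNat := by omega
              have := pvPowMod_char prime (by omega) d.toNat
              rw [this] at hpow
              have hpv : pvR P d.toNat = 1 := by exact_mod_cast hpow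
              exact hminR d.toNat hdN1 hdN ((pvR_eq_one_iff P (by omega) d.toNat).mp hpv)
          rw [hAval, hBval]
          exact pvDsum_val prime hp3 N hsum2 hr0 hRN
        · -- not full reptend: both return 0
          have hAval : cyclic_digit_sum prime = 0 := by
            rw [hA, if_pos (by omega)]
          rw [hAval]
          unfold cyclic_digit_sum_alt
          rw [if_neg (by push_neg; exact ⟨by omega, fun h => hnc.1 (hg2.mp h), fun h => hnc.2 (hg5.mp h)⟩)]
          simp only
          by_cases hpt : pvR P (P-1) = 1
          · -- 10^(P-1) ≡ 1 but the order N is a proper divisor: the divisor scan finds it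
            rw [if_neg (by rw [hpowtop, hpt]; exact fun h => h rfl)]
            have hxtop : (10:ZMod P)^(P-1) = 1 := (pvR_eq_one_iff P (by omega) (P-1)).mp hpt
            have hNle : N ≤ P - 1 := Nat.find_le ⟨by omega, Or.inl (by omega)⟩
            have hNlt : N < P - 1 := by omega
            have hNdvd : N ∣ (P - 1) := pvOrd_dvd P N (by omega) hx1 hminR (P-1) hxtop
            have hDdvd : ((N:ℤ)) ∣ (prime - 1) := by
              have := Int.natCast_dvd_natCast.mpr hNdvd
              rwa [show ((P - 1 : ℕ) : ℤ) = prime - 1 by omega] at this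
            have hpowN : PySem.Int.powMod 10 ((N:ℤ)).toNat prime = 1 := by
              rw [Int.toNat_natCast, pvPowMod_char prime (by omega) N, hRN]
              rfl
            refine (pvAltLoop_zero prime (prime - 1) (by omega) (N:ℤ) (by omega)
              (by omega) hDdvd hpowN ((prime-1).toNat + 2) 1 (by omega) ?_ ?_).symm
            · have h1 : (1:ℤ) ≤ (prime - 1) / (N:ℤ) :=
                Int.le_ediv_iff_mul_le (by omega) |>.mpr (by simpa using Int.le_of_dvd (by omega) hDdvd)
              simp only [le_min_iff]
              omega
            · have hminle : min ((N:ℤ)) ((prime - 1) / (N:ℤ)) ≤ (N:ℤ) := min_le_left _ _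
              omega
          · rw [if_pos (by rw [hpowtop]; exact_mod_cast fun h => hpt (by exact_mod_cast h))]

theorem cyclic_digit_sum_changed : Claim_changed_cyclic_digit_sum := by
  unfold Claim_changed_cyclic_digit_sum; decide

theorem cyclic_digit_sum_tight : Claim_exact_cyclic_digit_sum := by
  unfold Claim_exact_cyclic_digit_sum
  intro prime _ _ hD; subst hD; decide
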